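-- pv_equiv track=rewrite | github.com/MikeBrants/friendly-fishstick | crypto_backtest/validation/pbo_cscv.py | _create_fold_indices
-- ===== SOURCE A (Python) =====
-- from typing import Tuple, List, Dict, Optional
--
-- def _create_fold_indices(n_bars: int, n_folds: int) -> List[Tuple[int, int]]:
--     """Create fold boundary indices."""
--     fold_size = n_bars // n_folds
--     indices = []
--     for i in range(n_folds):
--         start = i * fold_size
--         end = (i + 1) * fold_size if i < n_folds - 1 else n_bars
--         indices.append((start, end))
--     return indices
-- ===== SOURCE B (Python) =====
-- from typing import Tuple, List
--
--
-- def _create_fold_indices(n_bars: int, n_folds: int) -> List[Tuple[int, int]]: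
--     """Create fold boundary indices, built back-to-front.
--
--     Walk the folds in reverse, threading each fold's start down as the
--     previous fold's end (the last fold ends at n_bars), then reverse.
--     No last-fold branch and no (i+1)*fold_size is ever computed.
--     """
--     fold_size = n_bars // n_folds
--     acc = []
--     end = n_bars
--     for i in reversed(range(n_folds)):
--         start = i * fold_size
--         acc.append((start, end))
--         end = start
--     acc.reverse()
--     return acc
-- ===== Notes on version B (the rewrite author's own statement) =====
-- stated objective: alternative
-- what changed: B builds the fold list back-to-front: it walks the folds in reverse, threading each fold's start down as the previous fold's end (last fold ends at n_bars) and reverses at the end, so the per-iteration last-fold branch and the (i+1)*fold_size end computation of A disappear.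
import Mathlib
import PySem

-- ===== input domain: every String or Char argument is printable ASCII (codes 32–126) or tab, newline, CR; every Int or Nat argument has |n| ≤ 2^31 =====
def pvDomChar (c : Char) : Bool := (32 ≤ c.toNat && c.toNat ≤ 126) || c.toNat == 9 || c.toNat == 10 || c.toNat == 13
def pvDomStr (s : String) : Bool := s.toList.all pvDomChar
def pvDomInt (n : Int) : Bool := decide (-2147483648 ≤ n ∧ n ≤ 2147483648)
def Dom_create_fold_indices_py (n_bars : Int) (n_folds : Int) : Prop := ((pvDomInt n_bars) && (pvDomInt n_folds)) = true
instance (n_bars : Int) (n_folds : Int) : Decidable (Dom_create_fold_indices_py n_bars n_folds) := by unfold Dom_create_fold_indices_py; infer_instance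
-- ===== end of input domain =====

-- B builds the fold list back-to-front, threading each fold's start down as the
-- previous fold's end, then reverses; objective: alternative (no last-fold branch).


-- ===== PORT A =====
def create_fold_indices_py (n_bars : Int) (n_folds : Int) : List (Int × Int) :=
  let fold_size := PySem.Int.floordiv n_bars n_folds
  (PySem.List.pyRange 0 n_folds 1).foldl
    (fun indices i =>
      indices ++ [(i * fold_size, if i < n_folds - 1 then (i + 1) * fold_size else n_bars)]) []

-- ===== PORT B =====
def create_fold_indices_py_alt (n_bars : Int) (n_folds : Int) : List (Int × Int) :=
  let fold_size := PySem.Int.floordiv n_bars n_folds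
  -- for i in reversed(range(n_folds)): acc.append((i*fold_size, end)); end = i*fold_size
  let st := ((PySem.List.pyRange 0 n_folds 1).reverse).foldl
    (fun (st : List (Int × Int) × Int) i => (st.1 ++ [(i * fold_size, st.2)], i * fold_size))
    ([], n_bars)
  st.1.reverse

-- ===== PRECONDITION & SPEC =====
-- Python A raises ZeroDivisionError at n_folds = 0 (n_bars // n_folds); excluded here.
def Pre_create_fold_indices_py (n_bars : Int) (n_folds : Int) : Prop := n_folds ≠ 0
instance (n_bars : Int) (n_folds : Int) : Decidable (Pre_create_fold_indices_py n_bars n_folds) := by unfold Pre_create_fold_indices_py; infer_instance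
def pvWitness_create_fold_indices_py : Int × Int := (10, 3)

def Spec_create_fold_indices_py (n_bars : Int) (n_folds : Int) (out : List (Int × Int)) : Prop := out = create_fold_indices_py_alt n_bars n_folds
instance (n_bars : Int) (n_folds : Int) (out : List (Int × Int)) : Decidable (Spec_create_fold_indices_py n_bars n_folds out) := by unfold Spec_create_fold_indices_py; infer_instance

-- ===== CLAIM (what is proved, stated in full; the proofs are below) =====
def Claim_equal_create_fold_indices_py : Prop := ∀ (n_bars : Int) (n_folds : Int), Dom_create_fold_indices_py n_bars n_folds → Pre_create_fold_indices_py n_bars n_folds → Spec_create_fold_indices_py n_bars n_folds (create_fold_indices_py n_bars n_folds)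

-- ===== LEMMAS AND PROOFS =====

-- the common value of both ports for m folds of size fs with final end e
def pvF (fs e : Int) (m : Nat) (j : Nat) : Int × Int :=
  ((j : Int) * fs, if j + 1 = m then e else ((j : Int) + 1) * fs)

def pvL (fs e : Int) (m : Nat) : List (Int × Int) :=
  (List.range m).map (pvF fs e m)

-- B's loop accumulates on the left of the state's list component
theorem pv_foldl_acc (fs : Int) (l : List Int) (p : List (Int × Int)) (e : Int) :
    l.foldl (fun (st : List (Int × Int) × Int) i => (st.1 ++ [(i * fs, st.2)], i * fs)) (p, e) =
    (p ++ (l.foldl (fun (st : List (Int × Int) × Int) i => (st.1 ++ [(i * fs, st.2)], i * fs)) ([], e)).1,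
     (l.foldl (fun (st : List (Int × Int) × Int) i => (st.1 ++ [(i * fs, st.2)], i * fs)) ([], e)).2) := by
  induction l generalizing p e with
  | nil => simp
  | cons a t ih =>
    simp only [List.foldl_cons, List.nil_append]
    rw [ih, ih [(a * fs, e)] (a * fs)]
    simp

theorem pvL_succ (fs e : Int) (m : Nat) :
    pvL fs (↑m * fs) m ++ [((m : Int) * fs, e)] = pvL fs e (m + 1) := by
  unfold pvL
  rw [List.range_succ, List.map_append]
  congr 1
  · apply List.map_congr_left
    intro j hj
    rw [List.mem_range] at hj
    unfold pvF
    by_cases h : j + 1 = m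
    · subst h
      rw [if_pos rfl, if_neg (by omega : ¬ j + 1 = j + 1 + 1)]
      simp only [Prod.mk.injEq, true_and]
      push_cast; ring
    · rw [if_neg h, if_neg (by omega : ¬ j + 1 = m + 1)]
  · simp [pvF]

theorem pv_B_val (fs : Int) (m : Nat) (e : Int) :
    ((((List.range m).map (fun j : Nat => (j : Int))).reverse.foldl
      (fun (st : List (Int × Int) × Int) i => (st.1 ++ [(i * fs, st.2)], i * fs)) ([], e)).1).reverse
    = pvL fs e m := by
  induction m generalizing e with
  | zero => simp [pvL]
  | succ k ih =>
    rw [List.range_succ, List.map_append, List.reverse_append]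
    simp only [List.map_cons, List.map_nil, List.reverse_cons, List.reverse_nil, List.nil_append,
      List.singleton_append, List.foldl_cons, List.nil_append]
    rw [pv_foldl_acc]
    simp only [List.reverse_append]
    rw [ih]
    simpa using pvL_succ fs e k

theorem pv_A_val (nb n : Int) (hn : 0 < n) :
    create_fold_indices_py nb n = pvL (PySem.Int.floordiv nb n) nb n.toNat := by
  unfold create_fold_indices_py
  rw [PySem.List.foldl_append_singleton_eq_map, PySem.List.pyRange_one]
  simp only [Int.sub_zero, List.map_map, List.nil_append, Function.comp_def, zero_add]
  unfold pvL
  apply List.map_congr_left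
  intro j hj
  rw [List.mem_range] at hj
  have hmn : ((n.toNat : Int)) = n := Int.toNat_of_nonneg (by omega)
  unfold pvF
  by_cases h : j + 1 = n.toNat
  · have hlt : ¬ ((j : Int) < n - 1) := by omega
    simp [hlt, h]
  · have hlt : (j : Int) < n - 1 := by omega
    simp [hlt, h]

-- ===== VERDICT (by name: the statement is the Claim_ definition above) =====
theorem create_fold_indices_py_spec : Claim_equal_create_fold_indices_py := by
  intro nb n _ hpre
  unfold Spec_create_fold_indices_py create_fold_indices_py_alt
  simp only []
  by_cases hn : n ≤ 0
  · rw [PySem.List.pyRange_one_eq_nil (by omega)]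
    unfold create_fold_indices_py
    rw [PySem.List.pyRange_one_eq_nil (by omega)]
    simp
  · rw [PySem.List.pyRange_one]
    simp only [Int.sub_zero]
    have hfun : (fun k : Nat => (0 : Int) + ↑k) = (fun j : Nat => (j : Int)) := by
      funext k; simp
    rw [hfun, pv_B_val, pv_A_val nb n (by omega)]
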